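-- pv_equiv track=rewrite | github.com/qq-ship/NV-Dou | source_code/game_model/PokerMapping.py | rhtorl
-- ===== SOURCE A (Python) =====
-- NumtoCard = {0:'3',1:'4',2:'5',3:'6',4:'7',5:'8',6:'9',7:'T',8:'J',9:'Q',10:'K',11:'A',12:'2',13:'B',14:'R'}
--
-- cardsIndexRH = {'3': 0, '4': 1, '5': 2, '6': 3, '7': 4, '8': 5, '9': 6, '10': 7, 'J': 8, 'Q': 9, 'K': 10, 'A': 11,'2': 12, '*': 13, '$': 14}
--
-- def rhtorl(putcard):
--     if len(putcard) == 0: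
--         action = 'pass'
--     else:
--         action = ''
--         cardindex = []
--         for i in range(len(putcard)):
--             cardindex.append(cardsIndexRH[putcard[i]])
--         cardindex.sort()
--
--         for index in cardindex :
--             action = action + NumtoCard[index]
--
--     return action
-- ===== SOURCE B (Python) =====
-- # validate, then count per symbol over the fixed rank-ordered alphabet: no index list, no sort
-- _ORDER = [('3','3'),('4','4'),('5','5'),('6','6'),('7','7'),('8','8'),('9','9'),
--           ('10','T'),('J','J'),('Q','Q'),('K','K'),('A','A'),('2','2'),('*','B'),('$','R')]
-- _KEYS = frozenset(k for k, _ in _ORDER)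
--
-- def rhtorl(putcard):
--     if not putcard:
--         return 'pass'
--     for c in putcard:
--         if c not in _KEYS:
--             raise KeyError(c)
--     return ''.join(out * putcard.count(key) for key, out in _ORDER)
-- ===== Notes on version B (the rewrite author's own statement) =====
-- stated objective: alternative
-- what changed: Instead of mapping each card to an index, comparison-sorting the index list and concatenating via a reverse table, B validates the cards (same KeyError on unknown cards) and then walks the fixed 15-symbol alphabet in rank order, emitting each output char repeated putcard.count(symbol) times; no index list and no sort.
import Mathlib
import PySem

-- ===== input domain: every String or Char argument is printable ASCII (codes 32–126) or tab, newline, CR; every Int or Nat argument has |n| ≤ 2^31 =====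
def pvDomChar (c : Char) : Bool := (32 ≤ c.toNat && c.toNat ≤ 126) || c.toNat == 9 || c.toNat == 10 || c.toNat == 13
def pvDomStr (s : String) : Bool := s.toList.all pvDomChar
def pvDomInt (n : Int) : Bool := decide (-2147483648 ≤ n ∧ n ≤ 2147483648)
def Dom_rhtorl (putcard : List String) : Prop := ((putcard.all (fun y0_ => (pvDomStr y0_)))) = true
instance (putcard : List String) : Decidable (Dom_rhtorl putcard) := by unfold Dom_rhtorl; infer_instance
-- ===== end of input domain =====

-- B replaces A's map-to-index / comparison-sort / reverse-table-concatenate pipeline by a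
-- scan of the fixed 15-symbol alphabet in rank order, emitting each output char once per
-- occurrence count of its key in the input (objective: alternative algorithm).

-- ===== PORT A =====
def NumtoCard : PySem.Dict Int (List Char) :=
  PySem.Dict.mk [(0,['3']),(1,['4']),(2,['5']),(3,['6']),(4,['7']),(5,['8']),(6,['9']),
    (7,['T']),(8,['J']),(9,['Q']),(10,['K']),(11,['A']),(12,['2']),(13,['B']),(14,['R'])]

def cardsIndexRH : PySem.Dict String Int :=
  PySem.Dict.mk [("3",0),("4",1),("5",2),("6",3),("7",4),("8",5),("9",6),("10",7),
    ("J",8),("Q",9),("K",10),("A",11),("2",12),("*",13),("$",14)]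

-- strings are built on the List Char side (PySem convention); dict lookups use getD, exact inside Pre_
def rhtorl (putcard : List String) : String :=
  if putcard.length = 0 then "pass"
  else
    let cardindex := putcard.foldl (fun acc c => acc ++ [cardsIndexRH.getD c 0]) []
    let cardindex := PySem.List.sorted cardindex (fun x => x) false
    String.ofList (cardindex.foldl (fun action index => action ++ NumtoCard.getD index []) [])

-- ===== PORT B =====
-- the fixed alphabet, (input key, output char), in rank order (Source B's _ORDER)
def pvOrder : List (String × Char) :=
  [("3",'3'),("4",'4'),("5",'5'),("6",'6'),("7",'7'),("8",'8'),("9",'9'),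
   ("10",'T'),("J",'J'),("Q",'Q'),("K",'K'),("A",'A'),("2",'2'),("*",'B'),("$",'R')]

def rhtorl_alt (putcard : List String) : String :=
  if putcard = [] then "pass"
  else
    -- Source B's validation loop raises KeyError on a card outside the alphabet; inside Pre_
    -- every card is a key, so the loop is a no-op and the port is exact there
    String.ofList (pvOrder.flatMap (fun p => List.replicate (putcard.count p.1) p.2))

-- ===== PRECONDITION & SPEC =====
-- Pre_ excludes inputs containing a string that is not a card key: there Python A raises KeyError.
def pvKeys : List String := ["3","4","5","6","7","8","9","10","J","Q","K","A","2","*","$"]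
def Pre_rhtorl (putcard : List String) : Prop := ∀ c ∈ putcard, c ∈ pvKeys
instance (putcard : List String) : Decidable (Pre_rhtorl putcard) := by unfold Pre_rhtorl; infer_instance
def pvWitness_rhtorl : List String := ["10", "J", "3", "3", "$"]

def Spec_rhtorl (putcard : List String) (out : String) : Prop := out = rhtorl_alt putcard
instance (putcard : List String) (out : String) : Decidable (Spec_rhtorl putcard out) := by unfold Spec_rhtorl; infer_instance

-- ===== CLAIM (what is proved, stated in full; the proofs are below) =====
def Claim_equal_rhtorl : Prop := ∀ (putcard : List String), Dom_rhtorl putcard → Pre_rhtorl putcard → Spec_rhtorl putcard (rhtorl putcard)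

-- ===== LEMMAS AND PROOFS =====

-- abbreviation used only by the proofs
def pvIdx (c : String) : Int := cardsIndexRH.getD c 0

lemma pvIdx_range {c : String} (h : c ∈ pvKeys) : 0 ≤ pvIdx c ∧ pvIdx c < 15 := by
  simp [pvKeys] at h
  rcases h with h|h|h|h|h|h|h|h|h|h|h|h|h|h|h <;> subst h <;> decide

lemma count_flat (l : List Int) (n : Nat) (a : Int) :
    ((List.range n).flatMap (fun (k : Nat) => List.replicate (l.count (k : Int)) (k : Int))).count a
      = if 0 ≤ a ∧ a < n then l.count a else 0 := by
  induction n with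
  | zero => simp
  | succ n ih =>
    rw [List.range_succ, List.flatMap_append, List.count_append, ih]
    simp [List.count_replicate]
    by_cases hna : (n : Int) = a
    · subst hna
      have : (0 ≤ (n:Int) ∧ (n:Int) < (n:Int) + 1) := by omega
      have h2 : ¬ ((n:Int) < (n:Int)) := by omega
      simp [this]
    · by_cases h0 : 0 ≤ a ∧ a < (n : Int)
      · have h1 : 0 ≤ a ∧ a ≤ (n : Int) := by omega
        simp [hna, h0, h1]
      · have h1 : ¬ (0 ≤ a ∧ a ≤ (n : Int)) := by omega
        simp [hna, h0, h1]

lemma mem_flat {l : List Int} {n : Nat} {x : Int}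
    (hx : x ∈ (List.range n).flatMap (fun (k : Nat) => List.replicate (l.count (k : Int)) (k : Int))) :
    0 ≤ x ∧ x < n := by
  rw [List.mem_flatMap] at hx
  obtain ⟨k, hk, hxk⟩ := hx
  rw [List.mem_range] at hk
  rw [List.eq_of_mem_replicate hxk]
  omega

lemma pairwise_flat (l : List Int) (n : Nat) :
    ((List.range n).flatMap (fun (k : Nat) => List.replicate (l.count (k : Int)) (k : Int))).Pairwise (· ≤ ·) := by
  induction n with
  | zero => simp
  | succ n ih =>
    rw [List.range_succ, List.flatMap_append, List.pairwise_append]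
    refine ⟨ih, ?_, ?_⟩
    · simp [List.pairwise_replicate]
    · intro x hx y hy
      have hx' := mem_flat hx
      simp at hy
      rcases hy with ⟨-, rfl⟩
      omega

lemma sorted_eq_flat (l : List Int) (hl : ∀ v ∈ l, 0 ≤ v ∧ v < 15) :
    PySem.List.sorted l (fun x => x) false
      = (List.range 15).flatMap (fun (k : Nat) => List.replicate (l.count (k : Int)) (k : Int)) := by
  apply PySem.List.sorted_id_eq_of_perm_of_pairwise
  · rw [List.perm_iff_count]
    intro a
    rw [count_flat]
    by_cases ha : 0 ≤ a ∧ a < 15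
    · simp [ha]
    · have : a ∉ l := fun hm => ha (hl a hm)
      simp [ha, List.count_eq_zero.mpr this]
  · exact pairwise_flat l 15

lemma flatten_replicate_singleton {α : Type} (n : Nat) (a : α) :
    (List.replicate n [a]).flatten = List.replicate n a := by
  induction n with
  | zero => rfl
  | succ n ih => simp [List.replicate_succ, ih]

lemma pvIdx_inj : ∀ c ∈ pvKeys, ∀ k ∈ pvKeys, pvIdx c = pvIdx k ↔ c = k := by decide

lemma count_map_idx (putcard : List String) (h : ∀ c ∈ putcard, c ∈ pvKeys)
    (k : String) (hk : k ∈ pvKeys) :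
    (putcard.map pvIdx).count (pvIdx k) = putcard.count k := by
  induction putcard with
  | nil => simp
  | cons c rest ih =>
    have hc : c ∈ pvKeys := h c (by simp)
    have hrest : ∀ x ∈ rest, x ∈ pvKeys := fun x hx => h x (by simp [hx])
    simp only [List.map_cons, List.count_cons, ih hrest]
    have := pvIdx_inj c hc k hk
    by_cases hck : c = k
    · simp [hck]
    · have : ¬ (pvIdx c = pvIdx k) := fun e => hck ((pvIdx_inj c hc k hk).mp e)
      have h1 : (pvIdx c == pvIdx k) = false := by simpa using this
      have h2 : (c == k) = false := by simpa using hck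
      simp [h1, h2]

lemma count_pair (putcard : List String) (h : ∀ c ∈ putcard, c ∈ pvKeys)
    (k : String) (i : Int) (hk : k ∈ pvKeys) (hi : pvIdx k = i) :
    (putcard.map pvIdx).count i = putcard.count k := by
  subst hi; exact count_map_idx putcard h k hk

-- ===== VERDICT (by name: the statement is the Claim_ definition above) =====
theorem rhtorl_spec : Claim_equal_rhtorl := by
  intro putcard _ hpre
  unfold Spec_rhtorl rhtorl rhtorl_alt
  by_cases hemp : putcard = []
  · simp [hemp]
  · have hlen : ¬ (putcard.length = 0) := by simp [hemp]
    simp only [hlen, hemp, if_false]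
    congr 1
    rw [PySem.List.foldl_append_singleton_eq_map, List.nil_append]
    have hrange : ∀ v ∈ putcard.map pvIdx, 0 ≤ v ∧ v < 15 := by
      intro v hv
      rw [List.mem_map] at hv
      obtain ⟨c, hc, rfl⟩ := hv
      exact pvIdx_range (hpre c hc)
    show ((PySem.List.sorted (putcard.map pvIdx) (fun x => x) false).foldl
        (fun action index => action ++ NumtoCard.getD index []) []) = _
    rw [PySem.List.foldl_append_eq_flatMap, List.nil_append, sorted_eq_flat _ hrange]
    rw [show List.range 15 = [0,1,2,3,4,5,6,7,8,9,10,11,12,13,14] from by decide]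
    simp only [List.flatMap_cons, List.flatMap_nil, List.flatMap_append, List.append_nil,
      List.flatMap_replicate, pvOrder]
    push_cast
    rw [count_pair putcard hpre "3" 0 (by decide) (by decide),
        count_pair putcard hpre "4" 1 (by decide) (by decide),
        count_pair putcard hpre "5" 2 (by decide) (by decide),
        count_pair putcard hpre "6" 3 (by decide) (by decide),
        count_pair putcard hpre "7" 4 (by decide) (by decide),
        count_pair putcard hpre "8" 5 (by decide) (by decide),
        count_pair putcard hpre "9" 6 (by decide) (by decide),
        count_pair putcard hpre "10" 7 (by decide) (by decide),
        count_pair putcard hpre "J" 8 (by decide) (by decide),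
        count_pair putcard hpre "Q" 9 (by decide) (by decide),
        count_pair putcard hpre "K" 10 (by decide) (by decide),
        count_pair putcard hpre "A" 11 (by decide) (by decide),
        count_pair putcard hpre "2" 12 (by decide) (by decide),
        count_pair putcard hpre "$" 14 (by decide) (by decide),
        count_pair putcard hpre "*" 13 (by decide) (by decide)]
    simp only [show (NumtoCard.getD 0 [] : List Char) = ['3'] from rfl,
      show (NumtoCard.getD 1 [] : List Char) = ['4'] from rfl,
      show (NumtoCard.getD 2 [] : List Char) = ['5'] from rfl,
      show (NumtoCard.getD 3 [] : List Char) = ['6'] from rfl,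
      show (NumtoCard.getD 4 [] : List Char) = ['7'] from rfl,
      show (NumtoCard.getD 5 [] : List Char) = ['8'] from rfl,
      show (NumtoCard.getD 6 [] : List Char) = ['9'] from rfl,
      show (NumtoCard.getD 7 [] : List Char) = ['T'] from rfl,
      show (NumtoCard.getD 8 [] : List Char) = ['J'] from rfl,
      show (NumtoCard.getD 9 [] : List Char) = ['Q'] from rfl,
      show (NumtoCard.getD 10 [] : List Char) = ['K'] from rfl,
      show (NumtoCard.getD 11 [] : List Char) = ['A'] from rfl,
      show (NumtoCard.getD 12 [] : List Char) = ['2'] from rfl,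
      show (NumtoCard.getD 13 [] : List Char) = ['B'] from rfl,
      show (NumtoCard.getD 14 [] : List Char) = ['R'] from rfl,
      flatten_replicate_singleton]
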